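-- pv_equiv track=rewrite | github.com/alecabiz97/MasterThesis | preprocessing_dataset1.py | opt_api
-- ===== SOURCE A (Python) =====
-- def opt_api(d):
--     apis = list(d.keys())
--     for i in range(len(apis)):
--         api_name = apis[i]
--         n = d[api_name]
--         if n <= 10:
--             apis[i] = f"Low_{api_name}"
--         elif 10 < n <= 100:
--             apis[i] = f"Med_{api_name}"
--         elif 100 < n <= 1000:
--             apis[i] = f"High_{api_name}"
--         elif n > 1000:
--             apis[i] = f"VeryHigh_{api_name}"
--     return apis
-- ===== SOURCE B (Python) =====
-- def opt_api(d):
--     # Staged passes: start with every key labelled VeryHigh, then three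
--     # refinement sweeps overwrite the label for values under each bound.
--     label = {k: "VeryHigh" for k in d}
--     for bound, name in ((1000, "High"), (100, "Med"), (10, "Low")):
--         for k, n in d.items():
--             if n <= bound:
--                 label[k] = name
--     return [f"{label[k]}_{k}" for k in d]
-- ===== Notes on version B (the rewrite author's own statement) =====
-- stated objective: alternative
-- what changed: Replaces the single in-place pass with an if/elif threshold cascade by a staged coarse-to-fine algorithm: a label map starts with every key as VeryHigh and three successive sweeps (bounds 1000, 100, 10) overwrite the label wherever the count is under the bound, then the output is assembled from the map.
import Mathlib
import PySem

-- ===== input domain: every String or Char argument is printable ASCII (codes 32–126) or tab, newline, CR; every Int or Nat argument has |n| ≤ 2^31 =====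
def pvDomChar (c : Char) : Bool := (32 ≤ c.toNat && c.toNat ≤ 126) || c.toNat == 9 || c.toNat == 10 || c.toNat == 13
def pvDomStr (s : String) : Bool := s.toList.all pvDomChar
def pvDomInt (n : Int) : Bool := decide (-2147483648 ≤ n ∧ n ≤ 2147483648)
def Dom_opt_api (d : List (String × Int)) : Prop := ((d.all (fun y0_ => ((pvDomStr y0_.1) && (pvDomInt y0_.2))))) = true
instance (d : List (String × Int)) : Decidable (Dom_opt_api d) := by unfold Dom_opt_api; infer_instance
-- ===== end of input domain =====

-- B replaces A's single in-place pass with an if/elif cascade by staged coarse-to-fine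
-- sweeps over a label map (alternative decomposition, same cost).

-- ===== PORT A =====
def opt_api (d : List (String × Int)) : List String :=
  let dd := PySem.Dict.ofList d
  let apis := dd.keys
  (PySem.List.pyRange 0 (PySem.List.len apis) 1).foldl
    (fun apis i =>
      let api_name := PySem.List.pyGetD apis i ""
      let n := dd.getD api_name 0
      if n ≤ 10 then PySem.List.pySetD apis i ("Low_" ++ api_name)
      else if 10 < n ∧ n ≤ 100 then PySem.List.pySetD apis i ("Med_" ++ api_name)
      else if 100 < n ∧ n ≤ 1000 then PySem.List.pySetD apis i ("High_" ++ api_name)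
      else if n > 1000 then PySem.List.pySetD apis i ("VeryHigh_" ++ api_name)
      else apis)
    apis

-- ===== PORT B =====
def opt_api_alt (d : List (String × Int)) : List String :=
  let dd := PySem.Dict.ofList d
  let label0 : PySem.Dict String String :=
    dd.keys.foldl (fun m k => m.insert k "VeryHigh") PySem.Dict.empty
  let label := [((1000 : Int), "High"), (100, "Med"), (10, "Low")].foldl
    (fun m p => dd.items.foldl (fun m q => if q.2 ≤ p.1 then m.insert q.1 p.2 else m) m)
    label0
  dd.keys.map (fun k => label.getD k "" ++ "_" ++ k)

-- ===== PRECONDITION & SPEC =====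
def Spec_opt_api (d : List (String × Int)) (out : List String) : Prop := out = opt_api_alt d
instance (d : List (String × Int)) (out : List String) : Decidable (Spec_opt_api d out) := by unfold Spec_opt_api; infer_instance

-- ===== CLAIM =====
def Claim_equal_opt_api : Prop := ∀ (d : List (String × Int)), Dom_opt_api d → Spec_opt_api d (opt_api d)

-- ===== LEMMAS AND PROOFS =====

-- A's loop rewrites position i from the (untouched) element at position i: it is a map.
theorem pv_loop_eq_map (g : String → String) :
    ∀ (xs pre : List String),
      (PySem.List.pyRange (pre.length : Int) ((pre.length : Int) + xs.length) 1).foldl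
        (fun acc i => PySem.List.pySetD acc i (g (PySem.List.pyGetD acc i ""))) (pre ++ xs)
      = pre ++ xs.map g := by
  intro xs
  induction xs with
  | nil => intro pre; simp [PySem.List.pyRange_one_eq_nil]
  | cons x t ih =>
    intro pre
    rw [PySem.List.pyRange_one_cons (by push_cast [List.length_cons]; omega)]
    simp only [List.foldl_cons]
    have hget : PySem.List.pyGetD (pre ++ x :: t) (pre.length : Int) "" = x := by
      rw [PySem.List.pyGetD_natCast]
      simp
    have hset : PySem.List.pySetD (pre ++ x :: t) (pre.length : Int) (g x)
        = (pre ++ [g x]) ++ t := by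
      rw [PySem.List.pySetD_natCast]
      rw [List.set_append_right _ _ (le_refl _)]
      simp
    rw [hget, hset]
    have := ih (pre ++ [g x])
    simp only [List.length_append, List.length_singleton] at this
    calc (PySem.List.pyRange ((pre.length : Int) + 1) ((pre.length : Int) + ((t.length : Nat) + 1)) 1).foldl
            (fun acc i => PySem.List.pySetD acc i (g (PySem.List.pyGetD acc i ""))) ((pre ++ [g x]) ++ t)
        = (PySem.List.pyRange ((pre.length + 1 : Nat) : Int) (((pre.length + 1 : Nat) : Int) + (t.length : Nat)) 1).foldl
            (fun acc i => PySem.List.pySetD acc i (g (PySem.List.pyGetD acc i ""))) ((pre ++ [g x]) ++ t) := by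
          rw [show ((pre.length : Int) + ((t.length : Nat) + 1)) = ((pre.length + 1 : Nat) : Int) + (t.length : Nat) by push_cast; ring]
          rw [show ((pre.length : Int) + 1) = ((pre.length + 1 : Nat) : Int) by push_cast; ring]
      _ = (pre ++ [g x]) ++ t.map g := this
      _ = pre ++ (x :: t).map g := by simp

-- the bucket function A applies to a key, reading the dict
def pvLabelA (dd : PySem.Dict String Int) (s : String) : String :=
  let n := dd.getD s 0
  if n ≤ 10 then "Low_" ++ s
  else if 10 < n ∧ n ≤ 100 then "Med_" ++ s
  else if 100 < n ∧ n ≤ 1000 then "High_" ++ s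
  else if n > 1000 then "VeryHigh_" ++ s
  else s

theorem pv_body_eq (dd : PySem.Dict String Int) (acc : List String) (i : Int) :
    (let api_name := PySem.List.pyGetD acc i ""
     let n := dd.getD api_name 0
     if n ≤ 10 then PySem.List.pySetD acc i ("Low_" ++ api_name)
     else if 10 < n ∧ n ≤ 100 then PySem.List.pySetD acc i ("Med_" ++ api_name)
     else if 100 < n ∧ n ≤ 1000 then PySem.List.pySetD acc i ("High_" ++ api_name)
     else if n > 1000 then PySem.List.pySetD acc i ("VeryHigh_" ++ api_name)
     else acc)
    = PySem.List.pySetD acc i (pvLabelA dd (PySem.List.pyGetD acc i "")) := by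
  simp only [pvLabelA]
  split_ifs with h1 h2 h3 h4 <;> first | rfl | omega

theorem pv_a_eq_map (d : List (String × Int)) :
    opt_api d = ((PySem.Dict.ofList d).keys).map (pvLabelA (PySem.Dict.ofList d)) := by
  unfold opt_api
  simp only []
  have hbody : (fun (acc : List String) (i : Int) =>
      let api_name := PySem.List.pyGetD acc i ""
      let n := (PySem.Dict.ofList d).getD api_name 0
      if n ≤ 10 then PySem.List.pySetD acc i ("Low_" ++ api_name)
      else if 10 < n ∧ n ≤ 100 then PySem.List.pySetD acc i ("Med_" ++ api_name)
      else if 100 < n ∧ n ≤ 1000 then PySem.List.pySetD acc i ("High_" ++ api_name)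
      else if n > 1000 then PySem.List.pySetD acc i ("VeryHigh_" ++ api_name)
      else acc)
      = (fun acc i => PySem.List.pySetD acc i (pvLabelA (PySem.Dict.ofList d) (PySem.List.pyGetD acc i ""))) := by
    funext acc i; exact pv_body_eq _ acc i
  rw [hbody]
  have := pv_loop_eq_map (pvLabelA (PySem.Dict.ofList d)) ((PySem.Dict.ofList d).keys) []
  simpa [PySem.List.len] using this

-- a sweep does not touch a key that occurs nowhere in the swept list
theorem pv_sweep_notmem (bound : Int) (name : String) :
    ∀ (l : List (String × Int)) (m : PySem.Dict String String) (k : String),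
      k ∉ l.map Prod.fst →
      (l.foldl (fun m q => if q.2 ≤ bound then m.insert q.1 name else m) m).getD k ""
        = m.getD k "" := by
  intro l
  induction l with
  | nil => intro m k _; rfl
  | cons p t ih =>
    intro m k hk
    simp only [List.map_cons, List.mem_cons, not_or] at hk
    simp only [List.foldl_cons]
    split_ifs with h
    · rw [ih _ _ hk.2, PySem.Dict.getD_insert]
      simp [hk.1]
    · exact ih _ _ hk.2

-- effect of one sweep on a key present (once) in the swept list
theorem pv_sweep_getD (bound : Int) (name : String) :
    ∀ (l : List (String × Int)) (m : PySem.Dict String String) (k : String) (v : Int),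
      (l.map Prod.fst).Nodup → (k, v) ∈ l →
      (l.foldl (fun m q => if q.2 ≤ bound then m.insert q.1 name else m) m).getD k ""
        = if v ≤ bound then name else m.getD k "" := by
  intro l
  induction l with
  | nil => intro _ _ _ _ h; cases h
  | cons p t ih =>
    intro m k v hnd hm
    simp only [List.map_cons, List.nodup_cons] at hnd
    simp only [List.foldl_cons]
    rcases List.mem_cons.mp hm with heq | ht
    · subst heq
      have hk : k ∉ t.map Prod.fst := hnd.1
      split_ifs with h
      · rw [pv_sweep_notmem bound name t _ _ hk, PySem.Dict.getD_insert_self]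
      · exact pv_sweep_notmem bound name t _ _ hk
    · have hpk : k ≠ p.1 := by
        intro he
        exact hnd.1 (he ▸ List.mem_map_of_mem ht)
      by_cases h : p.2 ≤ bound
      · simp only [if_pos h]
        rw [ih _ _ _ hnd.2 ht, PySem.Dict.getD_insert, if_neg hpk]
      · simp only [if_neg h]
        exact ih _ _ _ hnd.2 ht

-- the initial sweep does not touch a key not in the list
theorem pv_init_notmem :
    ∀ (ks : List String) (m : PySem.Dict String String) (k : String), k ∉ ks →
      (ks.foldl (fun m k => m.insert k "VeryHigh") m).getD k "" = m.getD k "" := by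
  intro ks
  induction ks with
  | nil => intro _ _ _; rfl
  | cons x t ih =>
    intro m k hk
    simp only [List.mem_cons, not_or] at hk
    simp only [List.foldl_cons]
    rw [ih _ _ hk.2, PySem.Dict.getD_insert]
    simp [hk.1]

-- the initial VeryHigh map
theorem pv_init_getD :
    ∀ (ks : List String) (m : PySem.Dict String String) (k : String), k ∈ ks →
      (ks.foldl (fun m k => m.insert k "VeryHigh") m).getD k "" = "VeryHigh" := by
  intro ks
  induction ks with
  | nil => intro _ _ h; cases h
  | cons x t ih =>
    intro m k hk
    simp only [List.foldl_cons]
    rcases List.mem_cons.mp hk with heq | ht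
    · subst heq
      by_cases hkt : k ∈ t
      · exact ih _ _ hkt
      · rw [pv_init_notmem t _ _ hkt, PySem.Dict.getD_insert_self]
    · exact ih _ _ ht

theorem pv_pointwise (d : List (String × Int)) (k : String)
    (hk : k ∈ (PySem.Dict.ofList d).keys) :
    pvLabelA (PySem.Dict.ofList d) k
      = (let dd := PySem.Dict.ofList d
         let label0 : PySem.Dict String String :=
           dd.keys.foldl (fun m k => m.insert k "VeryHigh") PySem.Dict.empty
         let label := [((1000 : Int), "High"), (100, "Med"), (10, "Low")].foldl
           (fun m p => dd.items.foldl (fun m q => if q.2 ≤ p.1 then m.insert q.1 p.2 else m) m)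
           label0
         label.getD k "" ++ "_" ++ k) := by
  set dd := PySem.Dict.ofList d with hdd
  have hnd : dd.keys.Nodup := PySem.Dict.nodup_keys_ofList d
  have hndi : (dd.items.map Prod.fst).Nodup := hnd
  obtain ⟨v, hv⟩ : ∃ v, (k, v) ∈ dd.items := by
    rcases List.mem_map.mp hk with ⟨p, hp, he⟩
    exact ⟨p.2, by rw [← he]; exact hp⟩
  have hvget : dd.getD k 0 = v := PySem.Dict.getD_of_mem_items dd hv hnd 0
  simp only [List.foldl_cons, List.foldl_nil]
  rw [pv_sweep_getD 10 "Low" dd.items _ k v hndi hv]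
  rw [pv_sweep_getD 100 "Med" dd.items _ k v hndi hv]
  rw [pv_sweep_getD 1000 "High" dd.items _ k v hndi hv]
  rw [pv_init_getD dd.keys _ k hk]
  simp only [pvLabelA, hvget]
  split_ifs <;> first | omega | rfl

-- ===== VERDICT =====
theorem opt_api_spec : Claim_equal_opt_api := by
  intro d _
  unfold Spec_opt_api opt_api_alt
  rw [pv_a_eq_map d]
  exact List.map_congr_left (fun k hk => pv_pointwise d k hk)
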